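-- pv_equiv track=rewrite | github.com/literatures95/MDL | cleaner.py | merge_split_tables
-- ===== SOURCE A (Python) =====
-- def merge_split_tables(markdown: str) -> str:
--     """合并分割的表格"""
--     lines = markdown.split("\n")
--     result = []
--     in_table = False
--     current_table = []
--     for line in lines:
--         is_table_line = line.strip().startswith("|") and line.strip().endswith("|")
--         if is_table_line:
--             in_table = True
--             current_table.append(line)
--         else:
--             if in_table:
--                 if current_table:
--                     result.extend(current_table)
--                     result.append("")
--                 current_table = []
--                 in_table = False
--             result.append(line)
--     if current_table:
--         result.extend(current_table)
--     return "\n".join(result)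
-- ===== SOURCE B (Python) =====
-- def merge_split_tables(markdown: str) -> str:
--     """合并分割的表格"""
--     def is_table_line(line):
--         s = line.strip()
--         return s.startswith("|") and s.endswith("|")
--     lines = markdown.split("\n")
--     # group consecutive lines into runs of equal is_table_line value
--     runs = []
--     i = 0
--     while i < len(lines):
--         k = is_table_line(lines[i])
--         j = i + 1
--         while j < len(lines) and is_table_line(lines[j]) == k:
--             j += 1
--         runs.append((k, lines[i:j]))
--         i = j
--     result = []
--     for idx, (is_table, group) in enumerate(runs):
--         result.extend(group)
--         if is_table and idx != len(runs) - 1: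
--             result.append("")
--     return "\n".join(result)
-- ===== Notes on version B (the rewrite author's own statement) =====
-- stated objective: idiomatic
-- what changed: Replaces A's in_table flag and current_table accumulator with a two-phase run-grouping: lines are first grouped into consecutive runs of equal is_table_line value, then each run is emitted with a blank separator line after every non-final table run.
import Mathlib
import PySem

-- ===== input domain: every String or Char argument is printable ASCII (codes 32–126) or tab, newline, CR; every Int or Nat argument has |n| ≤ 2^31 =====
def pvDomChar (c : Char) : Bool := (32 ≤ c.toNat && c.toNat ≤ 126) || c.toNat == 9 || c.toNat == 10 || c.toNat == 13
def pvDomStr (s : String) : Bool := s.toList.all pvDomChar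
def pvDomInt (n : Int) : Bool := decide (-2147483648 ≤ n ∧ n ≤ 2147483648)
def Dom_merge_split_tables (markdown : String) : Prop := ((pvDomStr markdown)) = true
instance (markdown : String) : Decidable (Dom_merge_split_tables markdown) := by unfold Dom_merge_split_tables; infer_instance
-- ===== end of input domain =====

-- B replaces A's in_table flag and current_table accumulator by grouping the lines
-- into consecutive runs of equal table-ness and emitting a separator after each
-- non-final table run (objective: idiomatic decomposition, same cost).

-- ===== PORT A =====
-- line.strip().startswith("|") and line.strip().endswith("|")
def mstIsTab (line : String) : Bool :=
  PySem.Str.startswith (PySem.Str.strip line) "|" && PySem.Str.endswith (PySem.Str.strip line) "|"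

-- one iteration of A's for-loop; state st = (result, in_table, current_table)
def mstStep (st : List String × Bool × List String) (line : String) :
    List String × Bool × List String :=
  if mstIsTab line then
    (st.1, true, st.2.2 ++ [line])
  else if st.2.1 then
    -- flush: if current_table: result.extend(current_table); result.append("")
    ((if st.2.2.isEmpty then st.1 else st.1 ++ st.2.2 ++ [""]) ++ [line], false, [])
  else
    (st.1 ++ [line], st.2.1, st.2.2)

def merge_split_tables (markdown : String) : String :=
  -- markdown.split("\n"): the separator is the literal "\n" ≠ "", so split? is always `some`
  let lines := (PySem.Str.split? markdown "\n").getD []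
  let st := lines.foldl mstStep ([], false, [])
  PySem.Str.join "\n" (if st.2.2.isEmpty then st.1 else st.1 ++ st.2.2)

-- ===== PORT B =====
-- group consecutive lines into runs of equal mstIsTab value (Source B's two while loops)
def mstRuns : List String → List (Bool × List String)
  | [] => []
  | l :: ls =>
    (mstIsTab l, l :: ls.takeWhile (fun x => mstIsTab x == mstIsTab l)) ::
      mstRuns (ls.dropWhile (fun x => mstIsTab x == mstIsTab l))
termination_by ls => ls.length
decreasing_by
  exact Nat.lt_succ_of_le (List.length_dropWhile_le _ _)

-- Source B's emit loop: each run's lines, plus "" after a table run that is not last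
def mstEmit : List (Bool × List String) → List String
  | [] => []
  | (b, g) :: rest => g ++ (if b && !rest.isEmpty then [""] else []) ++ mstEmit rest

def merge_split_tables_alt (markdown : String) : String :=
  PySem.Str.join "\n" (mstEmit (mstRuns ((PySem.Str.split? markdown "\n").getD [])))

-- ===== PRECONDITION & SPEC =====
def Spec_merge_split_tables (markdown : String) (out : String) : Prop := out = merge_split_tables_alt markdown
instance (markdown : String) (out : String) : Decidable (Spec_merge_split_tables markdown out) := by unfold Spec_merge_split_tables; infer_instance

-- ===== CLAIM (what is proved, stated in full; the proofs are below) =====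
def Claim_equal_merge_split_tables : Prop := ∀ (markdown : String), Dom_merge_split_tables markdown → Spec_merge_split_tables markdown (merge_split_tables markdown)

-- ===== LEMMAS AND PROOFS =====

-- A's final flush, as a function of the loop state
def mstFin (st : List String × Bool × List String) : List String :=
  if st.2.2.isEmpty then st.1 else st.1 ++ st.2.2

-- straight-line functional characterisation of A's loop + final flush
def mstAfin : List String → List String → List String
  | cur, [] => cur
  | cur, l :: ls =>
    if mstIsTab l then mstAfin (cur ++ [l]) ls
    else (if cur.isEmpty then [] else cur ++ [""]) ++ l :: mstAfin [] ls

lemma mstFoldA (ls : List String) (res cur : List String) :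
    mstFin (ls.foldl mstStep (res, !cur.isEmpty, cur)) = res ++ mstAfin cur ls := by
  induction ls generalizing res cur with
  | nil =>
    by_cases h : cur.isEmpty
    · simp [mstFin, mstAfin, List.isEmpty_iff.mp h]
    · simp [mstFin, mstAfin, h]
  | cons l ls ih =>
    rw [List.foldl_cons]
    by_cases ht : mstIsTab l
    · have hstep : mstStep (res, !cur.isEmpty, cur) l = (res, !(cur ++ [l]).isEmpty, cur ++ [l]) := by
        simp [mstStep, ht]
      rw [hstep, ih]
      simp [mstAfin, ht]
    · by_cases hc : cur.isEmpty
      · have hcur : cur = [] := List.isEmpty_iff.mp hc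
        subst hcur
        have hstep : mstStep (res, !([] : List String).isEmpty, ([] : List String)) l
            = (res ++ [l], !([] : List String).isEmpty, ([] : List String)) := by
          simp [mstStep, ht]
        rw [hstep, ih]
        simp [mstAfin, ht]
      · have hstep : mstStep (res, !cur.isEmpty, cur) l
            = (res ++ cur ++ [""] ++ [l], !([] : List String).isEmpty, ([] : List String)) := by
          simp [mstStep, ht, hc]
        rw [hstep, ih]
        simp [mstAfin, ht, hc]
    
lemma mstTabRun (ts : List String) (rest cur : List String)
    (h : ∀ x ∈ ts, mstIsTab x = true) :
    mstAfin cur (ts ++ rest) = mstAfin (cur ++ ts) rest := by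
  induction ts generalizing cur with
  | nil => simp
  | cons t ts ih =>
    have ht : mstIsTab t = true := h t (by simp)
    simp only [List.cons_append, mstAfin, ht, if_pos]
    rw [ih _ (fun x hx => h x (by simp [hx]))]
    simp

lemma mstNonTabRun (ns : List String) (rest : List String)
    (h : ∀ x ∈ ns, mstIsTab x = false) :
    mstAfin [] (ns ++ rest) = ns ++ mstAfin [] rest := by
  induction ns with
  | nil => simp
  | cons n ns ih =>
    have hn : mstIsTab n = false := h n (by simp)
    simp only [List.cons_append, mstAfin, hn]
    simp [ih (fun x hx => h x (by simp [hx]))]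

lemma mstDropWhileHead {p : String → Bool} {l : List String} {r : String} {rest : List String}
    (h : l.dropWhile p = r :: rest) : p r = false := by
  induction l with
  | nil => simp [List.dropWhile] at h
  | cons a l ih =>
    by_cases ha : p a
    · rw [List.dropWhile_cons_of_pos ha] at h
      exact ih h
    · rw [List.dropWhile_cons_of_neg ha] at h
      cases h
      simpa using ha

lemma mstAfinEmit : ∀ n (ls : List String), ls.length ≤ n →
    mstAfin [] ls = mstEmit (mstRuns ls) := by
  intro n
  induction n with
  | zero =>
    intro ls h
    have : ls = [] := List.eq_nil_of_length_eq_zero (Nat.le_zero.mp h)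
    simp [this, mstAfin, mstRuns, mstEmit]
  | succ n ih =>
    intro ls hlen
    match ls with
    | [] => simp [mstAfin, mstRuns, mstEmit]
    | l :: ls =>
      rw [mstRuns]
      set p : String → Bool := fun x => mstIsTab x == mstIsTab l with hp
      have hsplit : ls.takeWhile p ++ ls.dropWhile p = ls := List.takeWhile_append_dropWhile
      have hdlen : (ls.dropWhile p).length ≤ n := by
        have h1 := List.length_dropWhile_le p ls
        have h2 : ls.length ≤ n := Nat.le_of_succ_le_succ (by simpa using hlen)
        omega
      by_cases ht : mstIsTab l
      · -- table run
        have hall : ∀ x ∈ l :: ls.takeWhile p, mstIsTab x = true := by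
          intro x hx
          rcases List.mem_cons.mp hx with h | h
          · subst h; exact ht
          · have := List.mem_takeWhile_imp h
            simpa [hp, ht] using this
        have h1 : mstAfin [] (l :: ls) = mstAfin (l :: ls.takeWhile p) (ls.dropWhile p) := by
          have := mstTabRun (l :: ls.takeWhile p) (ls.dropWhile p) [] hall
          simpa [hsplit] using this
        rw [h1]
        match hd : ls.dropWhile p with
        | [] =>
          simp [mstAfin, mstEmit, mstRuns, ht]
        | r :: rest =>
          have hr : mstIsTab r = false := by
            have := mstDropWhileHead hd
            simpa [hp, ht] using this
          have h2 : mstAfin (l :: ls.takeWhile p) (r :: rest)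
              = (l :: ls.takeWhile p) ++ [""] ++ (r :: mstAfin [] rest) := by
            simp [mstAfin, hr]
          have h3 : mstAfin [] (r :: rest) = r :: mstAfin [] rest := by
            simp [mstAfin, hr]
          rw [h2, ← h3, ih _ (by simpa [hd] using hdlen)]
          rw [mstEmit]
          simp [ht, mstRuns]
      · -- non-table run
        have hall : ∀ x ∈ l :: ls.takeWhile p, mstIsTab x = false := by
          intro x hx
          rcases List.mem_cons.mp hx with h | h
          · subst h; simpa using ht
          · have := List.mem_takeWhile_imp h
            simp [hp] at this
            simp [this, ht]
        have h1 : mstAfin [] (l :: ls) = (l :: ls.takeWhile p) ++ mstAfin [] (ls.dropWhile p) := by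
          have := mstNonTabRun (l :: ls.takeWhile p) (ls.dropWhile p) hall
          simpa [hsplit] using this
        rw [h1, ih _ hdlen, mstEmit]
        simp [ht]

-- ===== VERDICT (by name: the statement is the Claim_ definition above) =====
theorem merge_split_tables_spec : Claim_equal_merge_split_tables := by
  intro markdown _
  unfold Spec_merge_split_tables merge_split_tables merge_split_tables_alt
  have h := mstFoldA ((PySem.Str.split? markdown "\n").getD []) [] []
  rw [mstAfinEmit ((PySem.Str.split? markdown "\n").getD []).length _ le_rfl] at h
  simp only [mstFin, List.isEmpty_nil, Bool.not_true, List.nil_append] at h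
  exact congrArg (PySem.Str.join "\n") h
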